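-- pv_equiv track=rewrite | github.com/Hgabe/Otimizando-Rota-de-Drones | legacy/astas3d.py | is_accessible
-- ===== SOURCE A (Python) =====
-- from collections import deque
--
-- def is_accessible(drone_pos, collect_pos, goal_pos, charge_stations, walls, restricted_zone, maze_size):
--
--     blocked = walls | restricted_zone
--
--     def bfs_reachable(start):
--         visited = {start}
--         queue   = deque([start])
--         while queue:
--             col, row = queue.popleft()
--             for dc, dr in [(-1,0),(1,0),(0,-1),(0,1)]:
--                 nc, nr = col+dc, row+dr
--                 npos = (nc, nr)
--                 if (0 <= nc < maze_size and 0 <= nr < maze_size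
--                         and npos not in visited
--                         and npos not in blocked):
--                     visited.add(npos)
--                     queue.append(npos)
--         return visited
--
--     reachable = bfs_reachable(drone_pos)
--
--     critical = [collect_pos, goal_pos] + list(charge_stations)
--     return all(p in reachable for p in critical)
-- ===== SOURCE B (Python) =====
-- def is_accessible(drone_pos, collect_pos, goal_pos, charge_stations, walls, restricted_zone, maze_size):
--     # Computes the reachable region as the least fixed point of a whole-set
--     # dilation step: each pass maps the current frontier SET to its in-grid
--     # unblocked neighbour set minus what is already known (pure set algebra,
--     # no queue/stack and no per-cell visited bookkeeping), until nothing new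
--     # appears; the critical points are then answered by one subset test.
--     blocked = walls | restricted_zone
--     reachable = {drone_pos}
--     frontier = {drone_pos}
--     while frontier:
--         ring = {(c + dc, r + dr) for c, r in frontier
--                 for dc, dr in ((-1, 0), (1, 0), (0, -1), (0, 1))}
--         ring = {(c, r) for c, r in ring
--                 if 0 <= c < maze_size and 0 <= r < maze_size}
--         ring -= blocked
--         ring -= reachable
--         reachable |= ring
--         frontier = ring
--     return {collect_pos, goal_pos, *charge_stations} <= reachable
-- ===== Notes on version B (the rewrite author's own statement) =====
-- stated objective: alternative
-- what changed: A's node-at-a-time BFS (FIFO deque, pop one cell, scan its four neighbours, mark cells in a visited set, then test each critical point with 'in') is replaced by a level-synchronous fixed-point computation on whole sets: each pass dilates the current frontier set by one step with set comprehensions and set algebra (neighbour image, in-grid restriction, minus blocked, minus known), no queue/stack or per-cell bookkeeping exists, and the answer is a single subset test of the critical-point set against the fixed point.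
import Mathlib
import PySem

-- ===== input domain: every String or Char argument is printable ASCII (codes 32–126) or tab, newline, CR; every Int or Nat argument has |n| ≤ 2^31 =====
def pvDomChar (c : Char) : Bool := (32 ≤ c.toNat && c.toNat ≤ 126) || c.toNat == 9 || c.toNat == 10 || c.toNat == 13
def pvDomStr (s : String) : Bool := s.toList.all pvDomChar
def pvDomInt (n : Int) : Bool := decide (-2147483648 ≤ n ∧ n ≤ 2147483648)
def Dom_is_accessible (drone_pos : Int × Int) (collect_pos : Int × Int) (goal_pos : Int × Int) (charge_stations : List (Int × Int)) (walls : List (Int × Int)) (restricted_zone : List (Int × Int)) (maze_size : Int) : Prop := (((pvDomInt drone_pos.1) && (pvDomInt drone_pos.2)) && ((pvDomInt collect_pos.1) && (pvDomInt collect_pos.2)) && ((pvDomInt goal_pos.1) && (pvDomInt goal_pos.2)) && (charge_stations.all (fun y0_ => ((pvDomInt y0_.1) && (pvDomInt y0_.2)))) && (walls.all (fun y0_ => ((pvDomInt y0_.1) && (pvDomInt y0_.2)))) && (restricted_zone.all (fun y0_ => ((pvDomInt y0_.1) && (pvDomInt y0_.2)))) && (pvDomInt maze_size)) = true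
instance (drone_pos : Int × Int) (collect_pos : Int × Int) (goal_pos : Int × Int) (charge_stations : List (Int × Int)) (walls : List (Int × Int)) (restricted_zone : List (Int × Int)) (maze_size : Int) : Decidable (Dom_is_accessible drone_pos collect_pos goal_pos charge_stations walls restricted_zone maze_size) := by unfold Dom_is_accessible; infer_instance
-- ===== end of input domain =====

-- B replaces A's node-at-a-time BFS (queue, per-cell visited marking) by a level-synchronous
-- set-dilation fixed point (whole-set algebra per pass, one final subset test); same result,
-- proved via graph reachability (objective: alternative).

-- ===== PORT A =====
-- inner 'for dc,dr in [(-1,0),(1,0),(0,-1),(0,1)]' loop of bfs_reachable: threads (visited, queue)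
def pvBfsScan (N : Int) (blocked : List (Int × Int)) (col row : Int)
    (ds : List (Int × Int)) (st : List (Int × Int) × List (Int × Int)) :
    List (Int × Int) × List (Int × Int) :=
  match ds with
  | [] => st
  | d :: ds' =>
      let npos : Int × Int := (col + d.1, row + d.2)
      let st' := if 0 ≤ npos.1 ∧ npos.1 < N ∧ 0 ≤ npos.2 ∧ npos.2 < N ∧ npos ∉ st.1 ∧ npos ∉ blocked
                 then (PySem.Set.add st.1 npos, st.2 ++ [npos]) else st
      pvBfsScan N blocked col row ds' st'

-- 'while queue:' loop of bfs_reachable; fuel is a totality guard only (proved sufficient below)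
def pvBfsLoop (N : Int) (blocked : List (Int × Int)) :
    Nat → List (Int × Int) → List (Int × Int) → List (Int × Int)
  | _, visited, [] => visited
  | 0, visited, _ :: _ => visited
  | fuel+1, visited, p :: qs =>
      let st := pvBfsScan N blocked p.1 p.2 [(-1,0),(1,0),(0,-1),(0,1)] (visited, qs)
      pvBfsLoop N blocked fuel st.1 st.2

def is_accessible (drone_pos : Int × Int) (collect_pos : Int × Int) (goal_pos : Int × Int) (charge_stations : List (Int × Int)) (walls : List (Int × Int)) (restricted_zone : List (Int × Int)) (maze_size : Int) : Bool :=
  let blocked : PySem.Set (Int × Int) := PySem.Set.union (PySem.Set.ofList walls) restricted_zone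
  let reachable := pvBfsLoop maze_size blocked (maze_size.toNat * maze_size.toNat + 2)
      (PySem.Set.add PySem.Set.empty drone_pos) [drone_pos]
  let critical := [collect_pos, goal_pos] ++ charge_stations
  critical.all (fun p => PySem.Set.contains reachable p)

-- ===== PORT B =====
-- one dilation pass of Source B: the frontier's in-grid unblocked neighbour set minus the known set
def pvRing (N : Int) (blocked : List (Int × Int)) (reach frontier : PySem.Set (Int × Int)) :
    PySem.Set (Int × Int) :=
  let ring0 := PySem.Set.ofList (frontier.flatMap (fun c =>
    ([(-1, 0), (1, 0), (0, -1), (0, 1)] : List (Int × Int)).map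
      (fun d => (c.1 + d.1, c.2 + d.2))))
  let ring1 := PySem.Set.ofList (ring0.filter (fun p =>
    decide (0 ≤ p.1) && decide (p.1 < N) && decide (0 ≤ p.2) && decide (p.2 < N)))
  PySem.Set.diff (PySem.Set.diff ring1 blocked) reach

-- 'while frontier:' loop of Source B; fuel is a totality guard only (proved sufficient below)
def pvGrow (N : Int) (blocked : List (Int × Int)) :
    Nat → PySem.Set (Int × Int) → PySem.Set (Int × Int) → PySem.Set (Int × Int)
  | _, reach, [] => reach
  | 0, reach, _ :: _ => reach
  | fuel+1, reach, f :: fs =>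
      let ring := pvRing N blocked reach (f :: fs)
      pvGrow N blocked fuel (PySem.Set.union reach ring) ring

def is_accessible_alt (drone_pos : Int × Int) (collect_pos : Int × Int) (goal_pos : Int × Int) (charge_stations : List (Int × Int)) (walls : List (Int × Int)) (restricted_zone : List (Int × Int)) (maze_size : Int) : Bool :=
  let blocked : PySem.Set (Int × Int) := PySem.Set.union (PySem.Set.ofList walls) restricted_zone
  let reachable := pvGrow maze_size blocked (maze_size.toNat * maze_size.toNat + 2)
      (PySem.Set.ofList [drone_pos]) (PySem.Set.ofList [drone_pos])
  PySem.Set.issubset (PySem.Set.ofList ([collect_pos, goal_pos] ++ charge_stations)) reachable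

-- ===== PRECONDITION & SPEC =====
def Spec_is_accessible (drone_pos : Int × Int) (collect_pos : Int × Int) (goal_pos : Int × Int) (charge_stations : List (Int × Int)) (walls : List (Int × Int)) (restricted_zone : List (Int × Int)) (maze_size : Int) (out : Bool) : Prop := out = is_accessible_alt drone_pos collect_pos goal_pos charge_stations walls restricted_zone maze_size
instance (drone_pos : Int × Int) (collect_pos : Int × Int) (goal_pos : Int × Int) (charge_stations : List (Int × Int)) (walls : List (Int × Int)) (restricted_zone : List (Int × Int)) (maze_size : Int) (out : Bool) : Decidable (Spec_is_accessible drone_pos collect_pos goal_pos charge_stations walls restricted_zone maze_size out) := by unfold Spec_is_accessible; infer_instance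

-- ===== CLAIM (what is proved, stated in full; the proofs are below) =====
def Claim_equal_is_accessible : Prop := ∀ (drone_pos : Int × Int) (collect_pos : Int × Int) (goal_pos : Int × Int) (charge_stations : List (Int × Int)) (walls : List (Int × Int)) (restricted_zone : List (Int × Int)) (maze_size : Int), Dom_is_accessible drone_pos collect_pos goal_pos charge_stations walls restricted_zone maze_size → Spec_is_accessible drone_pos collect_pos goal_pos charge_stations walls restricted_zone maze_size (is_accessible drone_pos collect_pos goal_pos charge_stations walls restricted_zone maze_size)

-- ===== LEMMAS AND PROOFS =====

-- the grid-graph reachability A's BFS computes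
def pvInGrid (N : Int) (p : Int × Int) : Prop := 0 ≤ p.1 ∧ p.1 < N ∧ 0 ≤ p.2 ∧ p.2 < N

def pvFree (N : Int) (blocked : List (Int × Int)) (p : Int × Int) : Prop :=
  pvInGrid N p ∧ p ∉ blocked

def pvAdj (N : Int) (blocked : List (Int × Int)) (p q : Int × Int) : Prop :=
  (q = (p.1 - 1, p.2) ∨ q = (p.1 + 1, p.2) ∨ q = (p.1, p.2 - 1) ∨ q = (p.1, p.2 + 1)) ∧
    pvFree N blocked q

def pvReach (N : Int) (blocked : List (Int × Int)) (s p : Int × Int) : Prop :=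
  Relation.ReflTransGen (pvAdj N blocked) s p

-- a nodup list of cells each equal to s or inside the N×N grid has at most N²+1 elements
lemma pv_card (N : Int) (s : Int × Int) (v : List (Int × Int)) (hnd : v.Nodup)
    (hsh : ∀ x ∈ v, x = s ∨ pvInGrid N x) : v.length ≤ N.toNat * N.toNat + 1 := by
  have hsub : v.toFinset ⊆ insert s ((Finset.Ico 0 N) ×ˢ (Finset.Ico 0 N)) := by
    intro x hx
    rcases hsh x (List.mem_toFinset.mp hx) with h | h
    · simp [h]
    · exact Finset.mem_insert_of_mem (by
        rw [Finset.mem_product, Finset.mem_Ico, Finset.mem_Ico]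
        exact ⟨⟨h.1, h.2.1⟩, ⟨h.2.2.1, h.2.2.2⟩⟩)
  calc v.length = v.toFinset.card := (List.toFinset_card_of_nodup hnd).symm
    _ ≤ (insert s ((Finset.Ico 0 N) ×ˢ (Finset.Ico 0 N))).card := Finset.card_le_card hsub
    _ ≤ ((Finset.Ico 0 N) ×ˢ (Finset.Ico (0:Int) N)).card + 1 := Finset.card_insert_le _ _
    _ = N.toNat * N.toNat + 1 := by
        rw [Finset.card_product, Int.card_Ico]
        simp

-- the four neighbour offsets of A name the same cells as pvAdj's disjunction
lemma pvNbhd (p y : Int × Int) :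
    (y = (p.1 - 1, p.2) ∨ y = (p.1 + 1, p.2) ∨ y = (p.1, p.2 - 1) ∨ y = (p.1, p.2 + 1)) ↔
      ∃ d ∈ ([(-1,0),(1,0),(0,-1),(0,1)] : List (Int × Int)), y = (p.1 + d.1, p.2 + d.2) := by
  constructor
  · rintro (rfl | rfl | rfl | rfl)
    · exact ⟨(-1,0), by simp, by norm_num [Prod.mk.injEq, sub_eq_add_neg]⟩
    · exact ⟨(1,0), by simp, by norm_num [Prod.mk.injEq]⟩
    · exact ⟨(0,-1), by simp, by norm_num [Prod.mk.injEq, sub_eq_add_neg]⟩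
    · exact ⟨(0,1), by simp, by norm_num [Prod.mk.injEq]⟩
  · rintro ⟨d, hd, rfl⟩
    fin_cases hd <;> norm_num [Prod.mk.injEq, sub_eq_add_neg]

-- properties of one BFS neighbour scan
lemma pvBfsScan_props (N : Int) (blocked : List (Int × Int)) (col row : Int) :
    ∀ (ds : List (Int × Int)) (v q : List (Int × Int)), v.Nodup →
    (∀ x ∈ v, x ∈ (pvBfsScan N blocked col row ds (v, q)).1) ∧
    (∀ x ∈ (pvBfsScan N blocked col row ds (v, q)).1,
        x ∈ v ∨ ((∃ d ∈ ds, x = (col + d.1, row + d.2)) ∧ pvFree N blocked x)) ∧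
    (∀ x ∈ q, x ∈ (pvBfsScan N blocked col row ds (v, q)).2) ∧
    (∀ x ∈ (pvBfsScan N blocked col row ds (v, q)).2,
        x ∈ q ∨ x ∈ (pvBfsScan N blocked col row ds (v, q)).1) ∧
    (∀ x ∈ (pvBfsScan N blocked col row ds (v, q)).1,
        x ∉ v → x ∈ (pvBfsScan N blocked col row ds (v, q)).2) ∧
    (∀ d ∈ ds, pvFree N blocked (col + d.1, row + d.2) →
        (col + d.1, row + d.2) ∈ (pvBfsScan N blocked col row ds (v, q)).1) ∧
    (pvBfsScan N blocked col row ds (v, q)).1.Nodup ∧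
    (pvBfsScan N blocked col row ds (v, q)).2.length + v.length
      = q.length + (pvBfsScan N blocked col row ds (v, q)).1.length := by
  intro ds
  induction ds with
  | nil =>
      intro v q hnd
      simp only [pvBfsScan]
      refine ⟨fun x h => h, fun x h => Or.inl h, fun x h => h, fun x h => Or.inl h,
        fun x h hx => absurd h hx, by simp, hnd, trivial⟩
  | cons d ds' ih =>
      intro v q hnd
      by_cases hc : 0 ≤ (col + d.1, row + d.2).1 ∧ (col + d.1, row + d.2).1 < N ∧
          0 ≤ (col + d.1, row + d.2).2 ∧ (col + d.1, row + d.2).2 < N ∧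
          (col + d.1, row + d.2) ∉ v ∧ (col + d.1, row + d.2) ∉ blocked
      · have hstep : pvBfsScan N blocked col row (d :: ds') (v, q)
            = pvBfsScan N blocked col row ds' (v ++ [(col + d.1, row + d.2)],
                q ++ [(col + d.1, row + d.2)]) := by
          simp only [pvBfsScan, if_pos hc, PySem.Set.add_of_not_mem hc.2.2.2.2.1]
        have hnd' : (v ++ [(col + d.1, row + d.2)]).Nodup := by
          rw [List.nodup_append]
          exact ⟨hnd, List.nodup_singleton _,
            by intro a ha b hb heq
               have hb' : b = (col + d.1, row + d.2) := List.eq_of_mem_singleton hb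
               subst hb'; subst heq; exact hc.2.2.2.2.1 ha⟩
        obtain ⟨ih1, ih2, ih3, ih4, ih5, ih6, ih7, ih8⟩ :=
          ih (v ++ [(col + d.1, row + d.2)]) (q ++ [(col + d.1, row + d.2)]) hnd'
        rw [hstep]
        refine ⟨?_, ?_, ?_, ?_, ?_, ?_, ih7, by simp at ih8 ⊢; omega⟩
        · exact fun x h => ih1 x (by simp [h])
        · intro x h
          rcases ih2 x h with h' | ⟨⟨d', hd', hx⟩, hf⟩
          · rcases List.mem_append.mp h' with h'' | h''
            · exact Or.inl h''
            · refine Or.inr ⟨⟨d, by simp, by simpa using h''⟩, ?_⟩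
              have hx : x = (col + d.1, row + d.2) := by simpa using h''
              exact ⟨by rw [hx]; exact ⟨hc.1, hc.2.1, hc.2.2.1, hc.2.2.2.1⟩,
                by rw [hx]; exact hc.2.2.2.2.2⟩
          · exact Or.inr ⟨⟨d', by simp [hd'], hx⟩, hf⟩
        · exact fun x h => ih3 x (by simp [h])
        · intro x h
          rcases ih4 x h with h' | h'
          · rcases List.mem_append.mp h' with h'' | h''
            · exact Or.inl h''
            · exact Or.inr (ih1 x (by simp [h'']))
          · exact Or.inr h'
        · intro x h hxv
          by_cases hx : x = (col + d.1, row + d.2)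
          · exact ih3 x (by simp [hx])
          · exact ih5 x h (by simp [hxv, hx])
        · intro d' hd' hf
          rcases List.mem_cons.mp hd' with rfl | hd''
          · exact ih1 _ (by simp)
          · exact ih6 d' hd'' hf
      · have hstep : pvBfsScan N blocked col row (d :: ds') (v, q)
            = pvBfsScan N blocked col row ds' (v, q) := by
          simp only [pvBfsScan, if_neg hc]
        obtain ⟨ih1, ih2, ih3, ih4, ih5, ih6, ih7, ih8⟩ := ih v q hnd
        rw [hstep]
        refine ⟨ih1, ?_, ih3, ih4, ih5, ?_, ih7, ih8⟩
        · intro x h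
          rcases ih2 x h with h' | ⟨⟨d', hd', hx⟩, hf⟩
          · exact Or.inl h'
          · exact Or.inr ⟨⟨d', by simp [hd'], hx⟩, hf⟩
        · intro d' hd' hf
          rcases List.mem_cons.mp hd' with rfl | hd''
          · -- the guard failed, yet the cell is free: it must already be visited
            have hv : (col + d'.1, row + d'.2) ∈ v := by
              by_contra hnv
              exact hc ⟨hf.1.1, hf.1.2.1, hf.1.2.2.1, hf.1.2.2.2, hnv, hf.2⟩
            exact ih1 _ hv
          · exact ih6 d' hd'' hf

-- BFS loop postcondition: with enough fuel the loop returns a sound, adjacency-closed superset of visited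
lemma pvBfsLoop_post (N : Int) (blocked : List (Int × Int)) (s : Int × Int) :
    ∀ (fuel : Nat) (v q : List (Int × Int)), v.Nodup →
    (∀ x ∈ q, x ∈ v) →
    (∀ x ∈ v, pvReach N blocked s x) →
    (∀ x ∈ v, x ∈ q ∨ ∀ y, pvAdj N blocked x y → y ∈ v) →
    (∀ x ∈ v, x = s ∨ pvInGrid N x) →
    q.length + (N.toNat * N.toNat + 1 - v.length) ≤ fuel →
    (∀ x ∈ v, x ∈ pvBfsLoop N blocked fuel v q) ∧
    (∀ x ∈ pvBfsLoop N blocked fuel v q, pvReach N blocked s x) ∧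
    (∀ x ∈ pvBfsLoop N blocked fuel v q, ∀ y, pvAdj N blocked x y →
        y ∈ pvBfsLoop N blocked fuel v q) := by
  intro fuel
  induction fuel with
  | zero =>
      intro v q hnd hqv hreach hcl hsh hfuel
      cases q with
      | nil =>
          refine ⟨fun x h => h, hreach, fun x hx y hy => ?_⟩
          rcases hcl x hx with h | h
          · simp at h
          · exact h y hy
      | cons p qs => simp at hfuel
  | succ f ih =>
      intro v q hnd hqv hreach hcl hsh hfuel
      cases q with
      | nil =>
          refine ⟨fun x h => h, hreach, fun x hx y hy => ?_⟩
          rcases hcl x hx with h | h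
          · simp at h
          · exact h y hy
      | cons p qs =>
          obtain ⟨s1, s2, s3, s4, s5, s6, s7, s8⟩ :=
            pvBfsScan_props N blocked p.1 p.2 [(-1,0),(1,0),(0,-1),(0,1)] v qs hnd
          set st := pvBfsScan N blocked p.1 p.2 [(-1,0),(1,0),(0,-1),(0,1)] (v, qs) with hst
          have hpv : p ∈ v := hqv p (by simp)
          have hloop : pvBfsLoop N blocked (f+1) v (p :: qs) = pvBfsLoop N blocked f st.1 st.2 := by
            rw [pvBfsLoop, ← hst]
          have hqv' : ∀ x ∈ st.2, x ∈ st.1 := by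
            intro x hx
            rcases s4 x hx with h | h
            · exact s1 x (hqv x (by simp [h]))
            · exact h
          have hreach' : ∀ x ∈ st.1, pvReach N blocked s x := by
            intro x hx
            rcases s2 x hx with h | ⟨hd, hf⟩
            · exact hreach x h
            · exact Relation.ReflTransGen.tail (hreach p hpv) ⟨(pvNbhd p x).mpr hd, hf⟩
          have hcl' : ∀ x ∈ st.1, x ∈ st.2 ∨ ∀ y, pvAdj N blocked x y → y ∈ st.1 := by
            intro x hx
            by_cases hxv : x ∈ v
            · rcases hcl x hxv with hq | hc
              · rcases List.mem_cons.mp hq with rfl | hq'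
                · refine Or.inr fun y hy => ?_
                  obtain ⟨d, hd, rfl⟩ := (pvNbhd x y).mp hy.1
                  exact s6 d hd hy.2
                · exact Or.inl (s3 x hq')
              · exact Or.inr fun y hy => s1 y (hc y hy)
            · exact Or.inl (s5 x hx hxv)
          have hsh' : ∀ x ∈ st.1, x = s ∨ pvInGrid N x := by
            intro x hx
            rcases s2 x hx with h | ⟨_, hf⟩
            · exact hsh x h
            · exact Or.inr hf.1
          have hvsub : v.length ≤ st.1.length :=
            (List.subperm_of_subset hnd (fun x hx => s1 x hx)).length_le
          have hcard : st.1.length ≤ N.toNat * N.toNat + 1 := pv_card N s st.1 s7 hsh'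
          have hfuel' : st.2.length + (N.toNat * N.toNat + 1 - st.1.length) ≤ f := by
            simp at hfuel
            omega
          obtain ⟨r1, r2, r3⟩ := ih st.1 st.2 s7 hqv' hreach' hcl' hsh' hfuel'
          rw [hloop]
          exact ⟨fun x hx => r1 x (s1 x hx), r2, r3⟩

-- membership in A's reachable set is grid reachability
lemma pvBfs_mem (N : Int) (blocked : List (Int × Int)) (s x : Int × Int) :
    x ∈ pvBfsLoop N blocked (N.toNat * N.toNat + 2) [s] [s] ↔ pvReach N blocked s x := by
  obtain ⟨r1, r2, r3⟩ := pvBfsLoop_post N blocked s (N.toNat * N.toNat + 2) [s] [s]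
    (by simp) (by simp) (by intro x hx; simp at hx; subst hx; exact Relation.ReflTransGen.refl)
    (by intro x hx; simp at hx; subst hx; exact Or.inl (by simp))
    (by intro x hx; simp at hx; exact Or.inl hx)
    (by simp; omega)
  constructor
  · exact r2 x
  · intro h
    induction h with
    | refl => exact r1 s (by simp)
    | tail _ h2 ih => exact r3 _ ih _ h2

-- ===== B-side lemmas: the dilation fixed point is the same reachable set =====

lemma mem_pvRing (N : Int) (blocked : List (Int × Int))
    (reach frontier : PySem.Set (Int × Int)) (y : Int × Int) :
    y ∈ pvRing N blocked reach frontier ↔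
      (∃ x ∈ frontier, y = (x.1 - 1, x.2) ∨ y = (x.1 + 1, x.2) ∨
          y = (x.1, x.2 - 1) ∨ y = (x.1, x.2 + 1)) ∧
        pvFree N blocked y ∧ y ∉ reach := by
  unfold pvRing
  simp only [PySem.Set.mem_diff, PySem.Set.mem_ofList, List.mem_filter, List.mem_flatMap,
    List.mem_map, Bool.and_eq_true, decide_eq_true_eq]
  constructor
  · rintro ⟨⟨⟨⟨x, hx, d, hd, rfl⟩, hgrid⟩, hnb⟩, hnr⟩
    exact ⟨⟨x, hx, (pvNbhd x _).mpr ⟨d, hd, rfl⟩⟩,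
      ⟨⟨hgrid.1.1.1, hgrid.1.1.2, hgrid.1.2, hgrid.2⟩, hnb⟩, hnr⟩
  · rintro ⟨⟨x, hx, hdisj⟩, ⟨hgrid, hnb⟩, hnr⟩
    obtain ⟨d, hd, rfl⟩ := (pvNbhd x _).mp hdisj
    exact ⟨⟨⟨⟨x, hx, d, hd, rfl⟩,
      ⟨⟨⟨hgrid.1, hgrid.2.1⟩, hgrid.2.2.1⟩, hgrid.2.2.2⟩⟩, hnb⟩, hnr⟩

lemma pvRing_nodup (N : Int) (blocked : List (Int × Int))
    (reach frontier : PySem.Set (Int × Int)) : (pvRing N blocked reach frontier).Nodup := by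
  unfold pvRing
  exact PySem.Set.nodup_diff _ _ (PySem.Set.nodup_diff _ _ (PySem.Set.nodup_ofList _))

-- dilation loop postcondition: with enough fuel it returns a sound, adjacency-closed superset
lemma pvGrow_post (N : Int) (blocked : List (Int × Int)) (s : Int × Int) :
    ∀ (fuel : Nat) (reach frontier : PySem.Set (Int × Int)), reach.Nodup →
    (∀ x ∈ frontier, x ∈ reach) →
    (∀ x ∈ reach, pvReach N blocked s x) →
    (∀ x ∈ reach, x ∈ frontier ∨ ∀ y, pvAdj N blocked x y → y ∈ reach) →
    (∀ x ∈ reach, x = s ∨ pvInGrid N x) →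
    (N.toNat * N.toNat + 2 - reach.length ≤ fuel ∨ frontier = []) →
    (∀ x ∈ reach, x ∈ pvGrow N blocked fuel reach frontier) ∧
    (∀ x ∈ pvGrow N blocked fuel reach frontier, pvReach N blocked s x) ∧
    (∀ x ∈ pvGrow N blocked fuel reach frontier, ∀ y, pvAdj N blocked x y →
        y ∈ pvGrow N blocked fuel reach frontier) := by
  intro fuel
  induction fuel with
  | zero =>
      intro reach frontier hnd hfr hreach hcl hsh hfuel
      cases frontier with
      | nil =>
          refine ⟨fun x h => h, hreach, fun x hx y hy => ?_⟩
          rcases hcl x hx with h | h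
          · simp at h
          · exact h y hy
      | cons f fs =>
          exfalso
          have hcard : reach.length ≤ N.toNat * N.toNat + 1 := pv_card N s reach hnd hsh
          rcases hfuel with h | h
          · omega
          · simp at h
  | succ fu ih =>
      intro reach frontier hnd hfr hreach hcl hsh hfuel
      cases frontier with
      | nil =>
          refine ⟨fun x h => h, hreach, fun x hx y hy => ?_⟩
          rcases hcl x hx with h | h
          · simp at h
          · exact h y hy
      | cons f fs =>
          have hloop : pvGrow N blocked (fu+1) reach (f :: fs)
              = pvGrow N blocked fu (PySem.Set.union reach (pvRing N blocked reach (f :: fs)))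
                  (pvRing N blocked reach (f :: fs)) := rfl
          have hring := mem_pvRing N blocked reach (f :: fs)
          have hrnd := pvRing_nodup N blocked reach (f :: fs)
          have hdisj : ∀ x ∈ pvRing N blocked reach (f :: fs), x ∉ reach :=
            fun x hx => ((hring x).mp hx).2.2
          have happ : PySem.Set.union reach (pvRing N blocked reach (f :: fs))
              = reach ++ pvRing N blocked reach (f :: fs) := by
            show PySem.Set.update reach (pvRing N blocked reach (f :: fs)) = _
            exact PySem.Set.update_eq_append_of_disjoint _ _ hrnd hdisj
          have hnd' : (PySem.Set.union reach (pvRing N blocked reach (f :: fs))).Nodup :=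
            PySem.Set.nodup_union _ _ hnd
          have hmem' : ∀ x, x ∈ PySem.Set.union reach (pvRing N blocked reach (f :: fs)) ↔
              x ∈ reach ∨ x ∈ pvRing N blocked reach (f :: fs) := by
            intro x
            rw [happ, List.mem_append]
          have hfr' : ∀ x ∈ pvRing N blocked reach (f :: fs),
              x ∈ PySem.Set.union reach (pvRing N blocked reach (f :: fs)) :=
            fun x hx => (hmem' x).mpr (Or.inr hx)
          have hreach' : ∀ x ∈ PySem.Set.union reach (pvRing N blocked reach (f :: fs)),
              pvReach N blocked s x := by
            intro x hx
            rcases (hmem' x).mp hx with h | h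
            · exact hreach x h
            · obtain ⟨⟨x0, hx0, hdisj0⟩, hfree, -⟩ := (hring x).mp h
              exact Relation.ReflTransGen.tail (hreach x0 (hfr x0 hx0)) ⟨hdisj0, hfree⟩
          have hcl' : ∀ x ∈ PySem.Set.union reach (pvRing N blocked reach (f :: fs)),
              x ∈ pvRing N blocked reach (f :: fs) ∨
                ∀ y, pvAdj N blocked x y →
                  y ∈ PySem.Set.union reach (pvRing N blocked reach (f :: fs)) := by
            intro x hx
            rcases (hmem' x).mp hx with hxr | hxring
            · rcases hcl x hxr with hxf | hxcl
              · refine Or.inr fun y hy => ?_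
                by_cases hyr : y ∈ reach
                · exact (hmem' y).mpr (Or.inl hyr)
                · exact (hmem' y).mpr (Or.inr ((hring y).mpr ⟨⟨x, hxf, hy.1⟩, hy.2, hyr⟩))
              · exact Or.inr fun y hy => (hmem' y).mpr (Or.inl (hxcl y hy))
            · exact Or.inl hxring
          have hsh' : ∀ x ∈ PySem.Set.union reach (pvRing N blocked reach (f :: fs)),
              x = s ∨ pvInGrid N x := by
            intro x hx
            rcases (hmem' x).mp hx with h | h
            · exact hsh x h
            · exact Or.inr ((hring x).mp h).2.1.1
          have hfuel' : N.toNat * N.toNat + 2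
                - (PySem.Set.union reach (pvRing N blocked reach (f :: fs))).length ≤ fu ∨
              pvRing N blocked reach (f :: fs) = [] := by
            by_cases hr : pvRing N blocked reach (f :: fs) = []
            · exact Or.inr hr
            · left
              have hlen : (PySem.Set.union reach (pvRing N blocked reach (f :: fs))).length
                  = reach.length + (pvRing N blocked reach (f :: fs)).length := by
                rw [happ, List.length_append]
              have hpos : 0 < (pvRing N blocked reach (f :: fs)).length :=
                List.length_pos_of_ne_nil hr
              rcases hfuel with h | h
              · omega
              · simp at h
          obtain ⟨r1, r2, r3⟩ := ih (PySem.Set.union reach (pvRing N blocked reach (f :: fs)))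
            (pvRing N blocked reach (f :: fs)) hnd' hfr' hreach' hcl' hsh' hfuel'
          rw [hloop]
          exact ⟨fun x hx => r1 x ((hmem' x).mpr (Or.inl hx)), r2, r3⟩

-- membership in B's fixed point is grid reachability
lemma pvGrow_mem (N : Int) (blocked : List (Int × Int)) (s x : Int × Int) :
    x ∈ pvGrow N blocked (N.toNat * N.toNat + 2) [s] [s] ↔ pvReach N blocked s x := by
  obtain ⟨r1, r2, r3⟩ := pvGrow_post N blocked s (N.toNat * N.toNat + 2) [s] [s]
    (by simp) (by simp)
    (by intro x hx; simp at hx; subst hx; exact Relation.ReflTransGen.refl)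
    (by intro x hx; simp at hx; subst hx; exact Or.inl (by simp))
    (by intro x hx; simp at hx; exact Or.inl hx)
    (by left; simp)
  constructor
  · exact r2 x
  · intro h
    induction h with
    | refl => exact r1 s (by simp)
    | tail _ h2 ih => exact r3 _ ih _ h2

-- ===== VERDICT (by name: the statement is the Claim_ definition above) =====
theorem is_accessible_spec : Claim_equal_is_accessible := by
  intro drone_pos collect_pos goal_pos charge_stations walls restricted_zone maze_size _
  unfold Spec_is_accessible is_accessible is_accessible_alt
  rw [Bool.eq_iff_iff, List.all_eq_true, PySem.Set.issubset_iff]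
  have hinitA : PySem.Set.add (PySem.Set.empty (α := Int × Int)) drone_pos = [drone_pos] := rfl
  have hinitB : PySem.Set.ofList ([drone_pos] : List (Int × Int)) = [drone_pos] := rfl
  rw [hinitA, hinitB]
  have hpt : ∀ p : Int × Int,
      (PySem.Set.contains (pvBfsLoop maze_size
          (PySem.Set.union (PySem.Set.ofList walls) restricted_zone)
          (maze_size.toNat * maze_size.toNat + 2) [drone_pos] [drone_pos]) p = true) ↔
        p ∈ pvGrow maze_size (PySem.Set.union (PySem.Set.ofList walls) restricted_zone)
          (maze_size.toNat * maze_size.toNat + 2) [drone_pos] [drone_pos] := by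
    intro p
    rw [PySem.Set.contains_iff, pvBfs_mem, pvGrow_mem]
  constructor
  · intro h x hx
    rw [PySem.Set.mem_ofList] at hx
    exact (hpt x).mp (h x hx)
  · intro h p hp
    exact (hpt p).mpr (h p (by rw [PySem.Set.mem_ofList]; exact hp))
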